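-- pv_equiv track=rewrite | github.com/pratyush-ksingh/dsa-nova | step_16_dynamic_programming/16.2_1d_dp/IB157_kth_manhattan_distance/solution.py | best
-- ===== SOURCE A (Python) =====
-- from typing import List
-- from collections import deque
--
-- def _slide_max_1d(arr: List[int], K: int) -> List[int]:
--     n = len(arr)
--     res = [0] * n
--     dq = deque()
--     for i in range(n):
--         while dq and dq[0] < i - K:
--             dq.popleft()
--         while dq and arr[dq[-1]] <= arr[i]:
--             dq.pop()
--         dq.append(i)
--         res[i] = arr[dq[0]]
--     return res
--
-- def best(A: List[List[int]], K: int) -> List[List[int]]: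
--     R, C = len(A), len(A[0])
--
--     # Row-wise sliding max
--     row_max = [_slide_max_1d(A[i], K) for i in range(R)]
--
--     # Column-wise sliding max
--     res = [[0]*C for _ in range(R)]
--     for j in range(C):
--         col = [row_max[i][j] for i in range(R)]
--         col_max = _slide_max_1d(col, K)
--         for i in range(R):
--             res[i][j] = col_max[i]
--
--     return res
-- ===== SOURCE B (Python) =====
-- from typing import List
--
-- def best(A: List[List[int]], K: int) -> List[List[int]]:
--     # Simpler: naive backward-window maximum (no deque), separable row pass
--     # then column pass via comprehensions; same return value as the deque version.
--     R, C = len(A), len(A[0])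
--
--     def wmax(arr):
--         out = []
--         for i in range(len(arr)):
--             m = arr[i]
--             for t in range(max(0, i - K), i):
--                 if arr[t] > m:
--                     m = arr[t]
--             out.append(m)
--         return out
--
--     rows = [wmax(r) for r in A]
--     cols = [wmax([r[j] for r in rows]) for j in range(C)]
--     return [[cols[j][i] for j in range(C)] for i in range(R)]
-- ===== Notes on version B (the rewrite author's own statement) =====
-- stated objective: simpler
-- what changed: Replaces the monotone-deque sliding-window maximum and the mutate-in-place column refill with a naive backward-window max scan plus comprehension-based transpose assembly.
import Mathlib
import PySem

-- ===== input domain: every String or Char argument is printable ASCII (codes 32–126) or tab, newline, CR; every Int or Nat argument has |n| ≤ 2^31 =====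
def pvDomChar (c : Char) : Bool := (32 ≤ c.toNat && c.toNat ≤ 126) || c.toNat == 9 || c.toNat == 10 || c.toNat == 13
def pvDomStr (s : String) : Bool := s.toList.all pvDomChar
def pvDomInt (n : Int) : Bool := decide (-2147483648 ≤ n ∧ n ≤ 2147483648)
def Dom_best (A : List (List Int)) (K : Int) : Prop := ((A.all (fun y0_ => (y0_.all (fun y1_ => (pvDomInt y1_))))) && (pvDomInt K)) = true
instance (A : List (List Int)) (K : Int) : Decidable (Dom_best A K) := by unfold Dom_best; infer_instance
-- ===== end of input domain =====

-- B replaces the monotone-deque sliding maximum and in-place column refill by a naive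
-- backward-window scan and comprehension/transpose assembly (objective: simpler; not faster).

-- ===== PORT A =====
-- one iteration of the deque loop of _slide_max_1d (the two while loops, append, res write);
-- list indices are in range on the admitted inputs, so xs[i] is ported as getD
def pvA_step (arr : List Int) (K : Int) (st : List Nat × List Int) (i : Nat) : List Nat × List Int :=
  let dq1 := st.1.dropWhile (fun (t : Nat) => decide ((t : Int) < (i : Int) - K))
  let dq2 := (dq1.reverse.dropWhile (fun (t : Nat) => decide (arr.getD t 0 ≤ arr.getD i 0))).reverse
  let dq3 := dq2 ++ [i]
  (dq3, st.2 ++ [arr.getD (dq3.headD 0) 0])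

def slideMax1d (arr : List Int) (K : Int) : List Int :=
  ((List.range arr.length).foldl (pvA_step arr K) ([], [])).2

def best (A : List (List Int)) (K : Int) : List (List Int) :=
  let R := A.length
  let C := (A.headD []).length
  let rowMax := (List.range R).map (fun i => slideMax1d (A.getD i []) K)
  let res0 := (List.range R).map (fun _ => List.replicate C (0 : Int))
  (List.range C).foldl (fun res j =>
    let col := (List.range R).map (fun i => (rowMax.getD i []).getD j 0)
    let colMax := slideMax1d col K
    (List.range R).foldl (fun r i => r.set i ((r.getD i []).set j (colMax.getD i 0))) res) res0

-- ===== PORT B =====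
-- the helper wmax of Source B: naive backward-window maximum
def wmax (arr : List Int) (K : Int) : List Int :=
  (List.range arr.length).map (fun (i : Nat) =>
    (PySem.List.pyRange (max 0 ((i : Int) - K)) (i : Int) 1).foldl
      (fun (m t : Int) => if arr.getD t.toNat 0 > m then arr.getD t.toNat 0 else m) (arr.getD i 0))

def best_alt (A : List (List Int)) (K : Int) : List (List Int) :=
  let C := (A.headD []).length
  let rows := A.map (fun r => wmax r K)
  let cols := (List.range C).map (fun j => wmax (rows.map (fun r => r.getD j 0)) K)
  (List.range A.length).map (fun i => (List.range C).map (fun j => (cols.getD j []).getD i 0))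

-- ===== PRECONDITION & SPEC =====
-- Pre_ excludes exactly the inputs on which the Python A raises IndexError: the empty
-- outer list (A[0]) and rows shorter than the first row (row_max[i][j] in the column pass).
def Pre_best (A : List (List Int)) (K : Int) : Prop :=
  A ≠ [] ∧ ∀ r ∈ A, (A.headD []).length ≤ r.length
instance (A : List (List Int)) (K : Int) : Decidable (Pre_best A K) := by unfold Pre_best; infer_instance

def pvWitness_best : List (List Int) × Int := ([[1, 2], [3, 4]], 1)

def Spec_best (A : List (List Int)) (K : Int) (out : List (List Int)) : Prop := out = best_alt A K
instance (A : List (List Int)) (K : Int) (out : List (List Int)) : Decidable (Spec_best A K out) := by unfold Spec_best; infer_instance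

-- ===== CLAIM (what is proved, stated in full; the proofs are below) =====
def Claim_equal_best : Prop := ∀ (A : List (List Int)) (K : Int), Dom_best A K → Pre_best A K → Spec_best A K (best A K)

-- ===== LEMMAS AND PROOFS =====

-- value of B's inner loop at index i (wmax arr K = map over range of this, by rfl)
def wm (arr : List Int) (K : Int) (i : Nat) : Int :=
  (PySem.List.pyRange (max 0 ((i : Int) - K)) (i : Int) 1).foldl
    (fun (m t : Int) => if arr.getD t.toNat 0 > m then arr.getD t.toNat 0 else m) (arr.getD i 0)

theorem wmax_eq_map_wm (arr : List Int) (K : Int) :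
    wmax arr K = (List.range arr.length).map (wm arr K) := rfl

-- "t dominates every later index up to i": ∀ u ≤ i, t < u → arr[t] > arr[u]
def domB (arr : List Int) (i t : Nat) : Bool :=
  (List.range (i + 1)).all (fun u => decide (u ≤ t) || decide (arr.getD u 0 < arr.getD t 0))

def qB (arr : List Int) (K : Int) (i t : Nat) : Bool :=
  (decide ((i : Int) - K ≤ (t : Int)) || decide (t = i)) && domB arr i t

-- the deque contents after processing index i
def dqInv (arr : List Int) (K : Int) (i : Nat) : List Nat :=
  (List.range (i + 1)).filter (qB arr K i)

theorem domB_iff (arr : List Int) (i t : Nat) :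
    domB arr i t = true ↔ ∀ u : Nat, u ≤ i → t < u → arr.getD u 0 < arr.getD t 0 := by
  simp only [domB, List.all_eq_true, List.mem_range, Bool.or_eq_true, decide_eq_true_eq]
  constructor
  · intro h u hu ht
    rcases h u (by omega) with h' | h'
    · omega
    · exact h'
  · intro h u hu
    by_cases hc : u ≤ t
    · exact Or.inl hc
    · exact Or.inr (h u (by omega) (by omega))

theorem dropWhile_eq_filter_not {α : Type} (p : α → Bool) :
    ∀ (l : List α), l.Pairwise (fun x y => p y = true → p x = true) →
      l.dropWhile p = l.filter (fun x => !p x) := by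
  intro l
  induction l with
  | nil => intro _; rfl
  | cons a l ih =>
    intro hp
    rcases List.pairwise_cons.mp hp with ⟨ha, hl⟩
    by_cases hpa : p a = true
    · simp [hpa, ih hl]
    · have hall : ∀ b ∈ l, p b = false := by
        intro b hb
        by_contra hc
        exact hpa (ha b hb (by simpa using hc))
      have hfl : List.filter (fun x => !p x) l = l :=
        List.filter_eq_self.mpr (by intro b hb; simp [hall b hb])
      simp [hpa, hfl]

theorem dqInv_sorted (arr : List Int) (K : Int) (i : Nat) :
    (dqInv arr K i).Pairwise (· < ·) :=
  (List.pairwise_lt_range).filter _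

theorem mem_dqInv (arr : List Int) (K : Int) (i t : Nat) :
    t ∈ dqInv arr K i ↔ t < i + 1 ∧ qB arr K i t = true := by
  simp [dqInv, List.mem_filter]

-- values are strictly decreasing along the deque
theorem dqInv_vals (arr : List Int) (K : Int) (i : Nat) :
    (dqInv arr K i).Pairwise (fun t u => arr.getD u 0 < arr.getD t 0) := by
  have hs := dqInv_sorted arr K i
  apply List.pairwise_iff_forall_sublist.mpr
  intro t u hsub
  have ht : t ∈ dqInv arr K i := hsub.subset (by simp)
  have hu : u ∈ dqInv arr K i := hsub.subset (by simp)
  have htu : t < u := List.pairwise_iff_forall_sublist.mp hs hsub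
  rcases (mem_dqInv arr K i t).mp ht with ⟨_, hq⟩
  rcases (mem_dqInv arr K i u).mp hu with ⟨hu1, _⟩
  simp only [qB, Bool.and_eq_true] at hq
  exact (domB_iff arr i t).mp hq.2 u (by omega) htu

theorem dqInv_zero (arr : List Int) (K : Int) : dqInv arr K 0 = [0] := by
  simp [dqInv, List.range_succ, qB, domB]

theorem qB_succ (arr : List Int) (K : Int) (i t : Nat) (ht : t ≤ i) :
    qB arr K (i + 1) t
      = (qB arr K i t && !decide ((t : Int) < ((i + 1 : Nat) : Int) - K)
          && !decide (arr.getD t 0 ≤ arr.getD (i + 1) 0)) := by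
  rw [Bool.eq_iff_iff]
  simp only [qB, Bool.and_eq_true, Bool.or_eq_true, decide_eq_true_eq, Bool.not_eq_true',
    decide_eq_false_iff_not, domB_iff]
  constructor
  · rintro ⟨hmem, hdom⟩
    have hne : t ≠ i + 1 := by omega
    have hge : ((i + 1 : Nat) : Int) - K ≤ (t : Int) := by
      rcases hmem with h | h
      · exact h
      · omega
    refine ⟨⟨⟨Or.inl (by omega), ?_⟩, by omega⟩, ?_⟩
    · intro u hu htu
      exact hdom u (by omega) htu
    · have := hdom (i + 1) (by omega) (by omega)
      omega
  · rintro ⟨⟨⟨hmem, hdom⟩, hnl⟩, hval⟩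
    refine ⟨Or.inl (by omega), ?_⟩
    intro u hu htu
    by_cases hui : u ≤ i
    · exact hdom u hui htu
    · have : u = i + 1 := by omega
      subst this
      omega

-- one deque step: A's two while-loops plus append turn dqInv i into dqInv (i+1)
theorem dq_step (arr : List Int) (K : Int) (i : Nat) :
    ((((dqInv arr K i).dropWhile (fun (t : Nat) => decide ((t : Int) < ((i + 1 : Nat) : Int) - K))).reverse.dropWhile
        (fun (t : Nat) => decide (arr.getD t 0 ≤ arr.getD (i + 1) 0))).reverse ++ [i + 1])
      = dqInv arr K (i + 1) := by
  have hs := dqInv_sorted arr K i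
  have h1 : (dqInv arr K i).dropWhile (fun (t : Nat) => decide ((t : Int) < ((i + 1 : Nat) : Int) - K))
      = (dqInv arr K i).filter (fun (t : Nat) => !decide ((t : Int) < ((i + 1 : Nat) : Int) - K)) := by
    apply dropWhile_eq_filter_not
    refine hs.imp ?_
    intro a b hab
    simp only [decide_eq_true_eq]
    omega
  rw [h1]
  have h2 : ((dqInv arr K i).filter
        (fun (t : Nat) => !decide ((t : Int) < ((i + 1 : Nat) : Int) - K))).reverse.dropWhile
        (fun (t : Nat) => decide (arr.getD t 0 ≤ arr.getD (i + 1) 0))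
      = ((dqInv arr K i).filter
        (fun (t : Nat) => !decide ((t : Int) < ((i + 1 : Nat) : Int) - K))).reverse.filter
        (fun (t : Nat) => !decide (arr.getD t 0 ≤ arr.getD (i + 1) 0)) := by
    apply dropWhile_eq_filter_not
    rw [List.pairwise_reverse]
    refine ((dqInv_vals arr K i).filter _).imp ?_
    intro a b hab
    simp only [decide_eq_true_eq]
    omega
  rw [h2, List.filter_reverse, List.reverse_reverse]
  have hq : qB arr K (i + 1) (i + 1) = true := by
    simp only [qB, domB, Bool.and_eq_true, Bool.or_eq_true, decide_eq_true_eq,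
      List.all_eq_true, List.mem_range]
    exact ⟨Or.inr trivial, fun u hu => Or.inl (by omega)⟩
  unfold dqInv
  rw [List.range_succ (n := i + 1), List.filter_append]
  have h4 : [i + 1].filter (qB arr K (i + 1)) = [i + 1] := by simp [hq]
  rw [h4]
  congr 1
  rw [List.filter_filter, List.filter_filter]
  apply List.filter_congr
  intro t ht
  simp only [List.mem_range] at ht
  rw [qB_succ arr K i t (by omega)]
  ac_rfl

-- the head of the deque carries the window maximum = B's naive scan value
theorem head_dqInv (arr : List Int) (K : Int) (i : Nat) :
    arr.getD ((dqInv arr K i).headD 0) 0 = wm arr K i := by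
  have hi : i ∈ dqInv arr K i := by
    refine (mem_dqInv arr K i i).mpr ⟨by omega, ?_⟩
    simp only [qB, domB, Bool.and_eq_true, Bool.or_eq_true, decide_eq_true_eq,
      List.all_eq_true, List.mem_range]
    exact ⟨Or.inr trivial, fun u hu => Or.inl (by omega)⟩
  rcases hL : dqInv arr K i with _ | ⟨h, tl⟩
  · rw [hL] at hi; cases hi
  have hhin : h ∈ dqInv arr K i := by rw [hL]; exact List.mem_cons_self
  have hmin : ∀ t ∈ dqInv arr K i, h ≤ t := by
    intro t htmem
    rw [hL] at htmem
    have hp := dqInv_sorted arr K i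
    rw [hL, List.pairwise_cons] at hp
    rcases List.mem_cons.mp htmem with rfl | htl
    · exact le_refl _
    · exact le_of_lt (hp.1 t htl)
  rcases (mem_dqInv arr K i h).mp hhin with ⟨hhlt, hhq⟩
  simp only [qB, Bool.and_eq_true, Bool.or_eq_true, decide_eq_true_eq] at hhq
  obtain ⟨hhmem, hhdom⟩ := hhq
  have hhdom' := (domB_iff arr i h).mp hhdom
  -- abbreviations for B's scan
  set lo : Int := max 0 ((i : Int) - K) with hlo
  have hwm : wm arr K i
      = ((PySem.List.pyRange lo (i : Int) 1).map (fun (t : Int) => arr.getD t.toNat 0)).foldl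
          max (arr.getD i 0) := by
    have hfun : (fun (m t : Int) => if arr.getD t.toNat 0 > m then arr.getD t.toNat 0 else m)
        = fun (m t : Int) => max m (arr.getD t.toNat 0) := by
      funext m t
      simp only [gt_iff_lt]
      split <;> omega
    rw [wm, hfun, List.foldl_map]
  -- upper bound: the head dominates every window element
  have hub : ∀ u : Nat, u ≤ i → (u = i ∨ lo ≤ (u : Int)) → arr.getD u 0 ≤ arr.getD h 0 := by
    intro u hu hw
    by_contra hgt
    rw [Int.not_le] at hgt
    set P : Nat → Prop :=
      fun v => v ≤ i ∧ (v = i ∨ lo ≤ (v : Int)) ∧ arr.getD h 0 < arr.getD v 0 with hP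
    have hPu : P u := ⟨hu, hw, hgt⟩
    have hg : P (Nat.findGreatest P i) := Nat.findGreatest_spec hu hPu
    set g := Nat.findGreatest P i with hgdef
    obtain ⟨hg1, hg2, hg3⟩ := hg
    have hloK : (i : Int) - K ≤ lo := le_max_right _ _
    have hgq : qB arr K i g = true := by
      simp only [qB, Bool.and_eq_true, Bool.or_eq_true, decide_eq_true_eq, domB_iff]
      constructor
      · rcases hg2 with hgi | hglo
        · exact Or.inr hgi
        · exact Or.inl (by omega)
      · intro w hwle hgw
        have hnw : ¬ P w := Nat.findGreatest_is_greatest hgw hwle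
        have hww : w = i ∨ lo ≤ (w : Int) := by
          by_cases hwi : w = i
          · exact Or.inl hwi
          · right
            rcases hg2 with hgi | hglo
            · omega
            · omega
        have hnlt : ¬ arr.getD h 0 < arr.getD w 0 := fun hc => hnw ⟨hwle, hww, hc⟩
        omega
    have hgin : g ∈ dqInv arr K i := (mem_dqInv arr K i g).mpr ⟨by omega, hgq⟩
    rcases lt_or_eq_of_le (hmin g hgin) with hlt | heq
    · have := hhdom' g hg1 hlt
      omega
    · rw [← heq] at hg3; omega
  -- h itself is in the window
  have hhle : h ≤ i := by omega
  have hhwin : h = i ∨ lo ≤ (h : Int) := by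
    rcases hhmem with hKh | rfl
    · by_cases hhi : h = i
      · exact Or.inl hhi
      · exact Or.inr (max_le (by omega) hKh)
    · exact Or.inl rfl
  simp only [List.headD_cons]
  rw [hwm]
  apply le_antisymm
  · -- arr[h] ≤ fold (h contributes to the scan)
    rcases hhwin with rfl | hhlo
    · exact (PySem.List.le_foldl_max _ _).1
    · have hh' : h < i ∨ h = i := by omega
      rcases hh' with hh' | rfl
      · refine (PySem.List.le_foldl_max _ _).2 _ ?_
        refine List.mem_map.mpr ⟨(h : Int), ?_, by simp⟩
        exact (PySem.List.mem_pyRange_one).mpr ⟨hhlo, by omega⟩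
      · exact (PySem.List.le_foldl_max _ _).1
  · -- fold ≤ arr[h]
    rcases PySem.List.foldl_max_mem
        ((PySem.List.pyRange lo (i : Int) 1).map (fun (t : Int) => arr.getD t.toNat 0))
        (arr.getD i 0) with hcase | hcase
    · rw [hcase]; exact hub i (le_refl i) (Or.inl rfl)
    · rcases List.mem_map.mp hcase with ⟨t, htmem, hteq⟩
      rcases (PySem.List.mem_pyRange_one).mp htmem with ⟨hlot, hti⟩
      have ht0 : 0 ≤ t := le_trans (le_max_left _ _) hlot
      rw [← hteq]
      refine hub t.toNat (by omega) (Or.inr (by omega))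

theorem slide_state (arr : List Int) (K : Int) :
    ∀ n : Nat, (List.range (n + 1)).foldl (pvA_step arr K) ([], [])
      = (dqInv arr K n, (List.range (n + 1)).map (wm arr K)) := by
  intro n
  induction n with
  | zero =>
    have h0 : wm arr K 0 = arr.getD 0 0 := by
      have h := head_dqInv arr K 0
      rw [dqInv_zero] at h
      simpa using h.symm
    simp [pvA_step, dqInv_zero, h0, List.range_one]
  | succ n ih =>
    rw [List.range_succ, List.foldl_append, ih]
    simp only [List.foldl_cons, List.foldl_nil, pvA_step]
    rw [dq_step arr K n, head_dqInv arr K (n + 1)]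
    simp [List.map_append]

theorem slide_eq_wmax (arr : List Int) (K : Int) : slideMax1d arr K = wmax arr K := by
  rw [wmax_eq_map_wm]
  unfold slideMax1d
  cases hn : arr.length with
  | zero => simp
  | succ n => rw [slide_state arr K n]

theorem getD_set {α : Type} (l : List α) (m k : Nat) (x d : α) :
    (l.set m x).getD k d = if k = m ∧ m < l.length then x else l.getD k d := by
  simp only [List.getD_eq_getElem?_getD, List.getElem?_set]
  split_ifs with h1 h2 h3 h4 <;> simp_all

-- one column pass of A: filling row entries j of every row i < m
theorem fill_row (G : List Int) (j : Nat) :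
    ∀ (m : Nat) (res : List (List Int)),
      ((List.range m).foldl (fun r i => r.set i ((r.getD i []).set j (G.getD i 0))) res).length
          = res.length
      ∧ ∀ i : Nat,
          ((List.range m).foldl (fun r i => r.set i ((r.getD i []).set j (G.getD i 0))) res).getD i []
            = if i < m then (res.getD i []).set j (G.getD i 0) else res.getD i [] := by
  intro m
  induction m with
  | zero => intro res; exact ⟨rfl, fun i => by simp⟩
  | succ m ih =>
    intro res
    rw [List.range_succ, List.foldl_append, List.foldl_cons, List.foldl_nil]
    obtain ⟨ihlen, ihget⟩ := ih res
    refine ⟨by rw [List.length_set, ihlen], ?_⟩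
    intro i
    rw [getD_set, ihget m, ihget i, ihlen]
    split_ifs with h1 h2 h3
    all_goals try (obtain ⟨rfl, h1b⟩ := h1)
    all_goals first
      | rfl
      | (exfalso; omega)
      | (have hd : res.getD i [] = ([] : List Int) := List.getD_eq_default _ _ (by omega)
         rw [hd]; rfl)

-- the whole column pass of A, entrywise
theorem fill_grid (Gf : Nat → List Int) (R0 : Nat) :
    ∀ (c : Nat) (res : List (List Int)),
      ((List.range c).foldl (fun res j =>
          (List.range R0).foldl (fun r i => r.set i ((r.getD i []).set j ((Gf j).getD i 0))) res)
        res).length = res.length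
      ∧ (∀ i : Nat,
        (((List.range c).foldl (fun res j =>
            (List.range R0).foldl (fun r i => r.set i ((r.getD i []).set j ((Gf j).getD i 0))) res)
          res).getD i []).length = (res.getD i []).length)
      ∧ ∀ i j' : Nat, ∀ d : Int,
        (((List.range c).foldl (fun res j =>
            (List.range R0).foldl (fun r i => r.set i ((r.getD i []).set j ((Gf j).getD i 0))) res)
          res).getD i []).getD j' d
          = if i < R0 ∧ j' < c ∧ j' < (res.getD i []).length then (Gf j').getD i 0
            else (res.getD i []).getD j' d := by
  -- (parenthesised three-way conjunction)
  intro c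
  induction c with
  | zero =>
    intro res
    refine ⟨rfl, fun i => rfl, fun i j' d => by simp⟩
  | succ c ih =>
    intro res
    rw [List.range_succ, List.foldl_append, List.foldl_cons, List.foldl_nil]
    obtain ⟨ihlen, ihrow, ihget⟩ := ih res
    set F := (List.range c).foldl (fun res j =>
        (List.range R0).foldl (fun r i => r.set i ((r.getD i []).set j ((Gf j).getD i 0))) res)
      res with hF
    obtain ⟨flen, fget⟩ := fill_row (Gf c) c R0 F
    refine ⟨by rw [flen, ihlen], fun i => ?_, fun i j' d => ?_⟩
    · rw [fget i]
      by_cases hiR : i < R0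
      · rw [if_pos hiR, List.length_set, ihrow i]
      · rw [if_neg hiR, ihrow i]
    · rw [fget i]
      by_cases hiR : i < R0
      · rw [if_pos hiR, getD_set, ihrow i, ihget i j' d]
        split_ifs with h1 h2 h3
        all_goals try (obtain ⟨rfl, h1b⟩ := h1)
        all_goals first | rfl | (exfalso; omega)
      · rw [if_neg hiR, ihget i j' d]
        split_ifs with h1 h2
        all_goals first | rfl | (exfalso; omega)

theorem best_spec' : ∀ (A : List (List Int)) (K : Int), best A K = best_alt A K := by
  intro A K
  unfold best best_alt
  simp only [slide_eq_wmax]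
  have hcol : ∀ j : Nat,
      (List.range A.length).map (fun i =>
          (((List.range A.length).map (fun i' => wmax (A.getD i' []) K)).getD i []).getD j 0)
        = (A.map (fun r => wmax r K)).map (fun r => r.getD j 0) := by
    intro j
    apply List.ext_getElem (by simp)
    intro i h1 h2
    simp only [List.length_map, List.length_range] at h1
    rw [List.getElem_map, List.getElem_range, List.getElem_map, List.getElem_map,
      PySem.List.getD_map_range _ _ _ _ h1, List.getD_eq_getElem A [] (by simpa using h1)]
  obtain ⟨glen, grow, gget⟩ := fill_grid
    (fun j => wmax ((List.range A.length).map (fun i =>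
        (((List.range A.length).map (fun i' => wmax (A.getD i' []) K)).getD i []).getD j 0)) K)
    A.length ((A.headD []).length)
    ((List.range A.length).map (fun _ => List.replicate (A.headD []).length (0 : Int)))
  have hres0 : ∀ i : Nat, i < A.length →
      ((List.range A.length).map (fun _ => List.replicate (A.headD []).length (0 : Int))).getD i []
        = List.replicate (A.headD []).length (0 : Int) := by
    intro i hi
    exact PySem.List.getD_map_range _ _ _ _ hi
  apply List.ext_getElem
  · rw [glen]; simp
  intro i h1 h2
  have hiR : i < A.length := by simpa using h2
  rw [List.getElem_map, List.getElem_range, ← List.getD_eq_getElem _ [] h1]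
  apply List.ext_getElem
  · rw [grow i, hres0 i hiR]; simp
  intro j hj1 hj2
  have hjC : j < (A.headD []).length := by simpa using hj2
  rw [← List.getD_eq_getElem _ (0 : Int) hj1, gget i j 0,
    if_pos ⟨hiR, hjC, by rw [hres0 i hiR, List.length_replicate]; exact hjC⟩,
    List.getElem_map, List.getElem_range, PySem.List.getD_map_range _ _ _ _ hjC, hcol j]

-- ===== VERDICT (by name: the statement is the Claim_ definition above) =====
theorem best_spec : Claim_equal_best := by
  intro A K _ _
  unfold Spec_best
  exact best_spec' A K
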